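-- pv_equiv track=rewrite | github.com/srillaert/project-euler | p061.py | get_cyclical_figurate_numbers_from_list
-- ===== SOURCE A (Python) =====
-- def get_cyclical_figurate_numbers(lookup, current, stop, visited_types):
-- 	lookup_items = lookup.get(current%100)
-- 	for lookup_item in lookup_items:
-- 		n, figurate_type = lookup_item
-- 		if n == stop:
-- 			if all(visited_types):
-- 				return [current]
-- 			else:
-- 				return None
-- 		elif visited_types[figurate_type]:
-- 			continue # we have already visited this type without reaching a cycle
-- 		else:
-- 			visited_types[figurate_type] = True
-- 			result = get_cyclical_figurate_numbers(lookup, n, stop, visited_types)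
-- 			if result != None:
-- 				result.append(current)
-- 				return result
-- 			visited_types[figurate_type] = False
-- 	return None
--
-- def get_cyclical_figurate_numbers_from_list(figurate_numbers):
-- 	types_count = max(figurate_type for _, figurate_type in figurate_numbers) + 1
-- 	lookup = dict()
-- 	for n in range(100):
-- 		lookup[n] = []
-- 	for n, figurate_type in figurate_numbers:
-- 		lookup[n//100].append((n, figurate_type))
--
-- 	for lookup_value in lookup.values():
-- 		for start, figurate_type in lookup_value:
-- 			visited_types = [False] * types_count
-- 			visited_types[figurate_type] = True
-- 			result = get_cyclical_figurate_numbers(lookup, start, start, visited_types)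
-- 			if result != None:
-- 				result.reverse()
-- 				return result
-- 	return result
-- ===== SOURCE B (Python) =====
-- def get_cyclical_figurate_numbers_from_list(figurate_numbers):
-- 	types_count = max(figurate_type for _, figurate_type in figurate_numbers) + 1
-- 	lookup = dict()
-- 	for n in range(100):
-- 		lookup[n] = []
-- 	for n, figurate_type in figurate_numbers:
-- 		lookup[n//100].append((n, figurate_type))
--
-- 	for lookup_value in lookup.values():
-- 		for start, figurate_type in lookup_value:
-- 			visited = [False] * types_count
-- 			visited[figurate_type] = True
-- 			# iterative depth-first search with an explicit stack of
-- 			# (node, type marked when this frame was pushed, next candidate index)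
-- 			stack = [(start, figurate_type, 0)]
-- 			while stack:
-- 				node, marked, idx = stack[-1]
-- 				candidates = lookup[node % 100]
-- 				if idx >= len(candidates):
-- 					stack.pop()
-- 					visited[marked] = False
-- 					continue
-- 				stack[-1] = (node, marked, idx + 1)
-- 				n, t = candidates[idx]
-- 				if n == start:
-- 					if all(visited):
-- 						return [frame[0] for frame in stack]
-- 					# closing the cycle too early prunes this whole frame
-- 					stack.pop()
-- 					visited[marked] = False
-- 				elif visited[t]:
-- 					continue
-- 				else:
-- 					visited[t] = True
-- 					stack.append((n, t, 0))
-- 	return None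
-- ===== Notes on version B (the rewrite author's own statement) =====
-- stated objective: alternative
-- what changed: The recursive backtracking helper is replaced by an iterative depth-first search over an explicit stack of (node, marked type, next-candidate-index) frames that marks/unmarks visited types on push/pop and reconstructs the forward path from the stack on success; the preprocessing and all iteration orders are kept.
-- outside the precondition, e.g. on get_cyclical_figurate_numbers_from_list([(0, 0), (1, -5)]): A returns [0], B returns [0]; on get_cyclical_figurate_numbers_from_list([]): A raises ValueError, B raises ValueError; on get_cyclical_figurate_numbers_from_list([(10000, 0)]): A raises KeyError, B raises KeyError
import Mathlib
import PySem

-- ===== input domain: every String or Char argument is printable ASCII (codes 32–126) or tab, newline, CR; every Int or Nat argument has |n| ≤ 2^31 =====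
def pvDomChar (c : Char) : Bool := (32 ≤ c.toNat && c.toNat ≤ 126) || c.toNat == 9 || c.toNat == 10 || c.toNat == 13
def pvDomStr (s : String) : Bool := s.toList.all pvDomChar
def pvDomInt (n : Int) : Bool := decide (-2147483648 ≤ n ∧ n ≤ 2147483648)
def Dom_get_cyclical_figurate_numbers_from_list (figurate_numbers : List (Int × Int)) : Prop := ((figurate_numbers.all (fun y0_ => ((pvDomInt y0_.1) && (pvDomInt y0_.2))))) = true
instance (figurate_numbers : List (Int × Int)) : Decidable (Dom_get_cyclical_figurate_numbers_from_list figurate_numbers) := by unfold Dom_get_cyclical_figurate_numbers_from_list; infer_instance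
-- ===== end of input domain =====

-- B replaces A's recursive backtracking helper by an iterative depth-first search over an
-- explicit stack of (node, marked type, next candidate index) frames; same return value.

-- ===== PORT A =====
-- Helpers shared by both ports (both Pythons contain these very lines: the preprocessing of
-- figurate_numbers into types_count and lookup, and the visited_types list accesses).

-- Python list-index resolution (possibly negative index) used by `visited_types[...]`;
-- `none` is exactly Python's IndexError (excluded by Pre_).
def pvResolve (len : Nat) (i : Int) : Option Nat :=
  if 0 ≤ i then (if i < (len : Int) then some i.toNat else none)
  else if 0 ≤ i + (len : Int) then some (i + (len : Int)).toNat else none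

-- `visited_types[t]` (reads `true` where Python raises IndexError — outside Pre_)
def pvReadV (v : List Bool) (t : Int) : Bool :=
  match pvResolve v.length t with
  | some i => v.getD i true
  | none => true

-- `visited_types[t] = b` (no-op where Python raises IndexError — outside Pre_)
def pvWriteV (v : List Bool) (t : Int) (b : Bool) : List Bool :=
  match pvResolve v.length t with
  | some i => v.set i b
  | none => v

-- `types_count = max(figurate_type for ...) + 1` as the (nonnegative) length of the visited
-- list (`[False] * k` is empty for k ≤ 0; `max()` of an empty list raises ValueError — outside Pre_)
def pvTypesCnt (figurate_numbers : List (Int × Int)) : Nat :=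
  (((PySem.List.max? (figurate_numbers.map Prod.snd) (fun x => x)).getD 0) + 1).toNat

-- the `lookup` dict: keys 0..99 seeded with [], then each (n, t) appended to bucket n // 100
-- (Python raises KeyError when n // 100 is not a key — outside Pre_; Dict.modify inserts instead)
def pvBuildLookup (figurate_numbers : List (Int × Int)) : PySem.Dict Int (List (Int × Int)) :=
  let d0 := (PySem.List.pyRange 0 100 1).foldl
    (fun d n => d.insert n ([] : List (Int × Int))) PySem.Dict.empty
  figurate_numbers.foldl
    (fun d p => d.modify (PySem.Int.floordiv p.1 100) [] (fun xs => xs ++ [p])) d0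

-- `lookup_items = lookup.get(current % 100)` (the keys 0..99 are always present under Pre_)
def pvCands (lookup : PySem.Dict Int (List (Int × Int))) (node : Int) : List (Int × Int) :=
  lookup.getD (PySem.Int.mod node 100) []

-- termination facts for A's recursion: marking an unvisited type shrinks the false-count
theorem pvResolve_some_lt {len : Nat} {i : Int} {j : Nat} (h : pvResolve len i = some j) :
    j < len := by
  unfold pvResolve at h
  split_ifs at h <;> simp_all <;> omega

theorem pvReadV_false {v : List Bool} {t : Int} (h : pvReadV v t = false) :
    ∃ i, pvResolve v.length t = some i ∧ i < v.length ∧ v.getD i true = false := by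
  unfold pvReadV at h
  cases hr : pvResolve v.length t with
  | none => rw [hr] at h; simp at h
  | some i => rw [hr] at h; exact ⟨i, rfl, pvResolve_some_lt hr, h⟩

theorem pv_count_false_set_true : ∀ (v : List Bool) (i : Nat), i < v.length →
    v.getD i true = false → (v.set i true).count false + 1 = v.count false := by
  intro v
  induction v with
  | nil => intro i h; simp at h
  | cons a as ih =>
    intro i h hv
    cases i with
    | zero => simp_all
    | succ j =>
      simp only [List.set_cons_succ, List.count_cons]
      have := ih j (by simpa using h) (by simpa using hv)
      omega

theorem pvWriteV_true_count_eq {v : List Bool} {t : Int} (h : pvReadV v t = false) :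
    (pvWriteV v t true).count false + 1 = v.count false := by
  obtain ⟨i, hr, hi, hv⟩ := pvReadV_false h
  have e : pvWriteV v t true = v.set i true := by unfold pvWriteV; rw [hr]
  rw [e]
  exact pv_count_false_set_true v i hi hv

theorem pvWriteV_true_count_lt {v : List Bool} {t : Int} (h : pvReadV v t = false) :
    (pvWriteV v t true).count false < v.count false := by
  have := pvWriteV_true_count_eq h
  omega

-- A's recursive helper `get_cyclical_figurate_numbers`: pvLoopA is its for-loop over
-- lookup_items; the recursive call is inlined (one unfolding of the helper) so that the
-- recursion is on (unvisited-type count, remaining items) — same computation step for step.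
def pvLoopA (lookup : PySem.Dict Int (List (Int × Int))) (stop current : Int)
    (v : List Bool) (items : List (Int × Int)) : Option (List Int) :=
  match items with
  | [] => none
  | (n, t) :: rest =>
    if n = stop then
      (if v.all (fun b => b) then some [current] else none)
    else if pvReadV v t then
      pvLoopA lookup stop current v rest
    else
      match pvLoopA lookup stop n (pvWriteV v t true) (pvCands lookup n) with
      | some r => some (r ++ [current])
      | none => pvLoopA lookup stop current v rest
termination_by (v.count false, items.length)
decreasing_by
  · apply Prod.Lex.right; simp
  · apply Prod.Lex.left; apply pvWriteV_true_count_lt; simp_all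
  · apply Prod.Lex.right; simp

-- `get_cyclical_figurate_numbers(lookup, current, stop, visited_types)`
def pvDfsA (lookup : PySem.Dict Int (List (Int × Int))) (current stop : Int)
    (v : List Bool) : Option (List Int) :=
  pvLoopA lookup stop current v (pvCands lookup current)

-- A's outer scan of one bucket: each element tried as `start` with a fresh visited list
def pvScanA (lookup : PySem.Dict Int (List (Int × Int))) (T : Nat) :
    List (Int × Int) → Option (List Int)
  | [] => none
  | (start, t) :: rest =>
    match pvDfsA lookup start start (pvWriteV (List.replicate T false) t true) with
    | some r => some r.reverse
    | none => pvScanA lookup T rest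

-- `for lookup_value in lookup.values(): ...`; falls through to `return result` (= None)
def pvOuterA (lookup : PySem.Dict Int (List (Int × Int))) (T : Nat) :
    List (List (Int × Int)) → Option (List Int)
  | [] => none
  | b :: bs =>
    match pvScanA lookup T b with
    | some r => some r
    | none => pvOuterA lookup T bs

def get_cyclical_figurate_numbers_from_list (figurate_numbers : List (Int × Int)) : Option (List Int) :=
  let T := pvTypesCnt figurate_numbers
  let lookup := pvBuildLookup figurate_numbers
  pvOuterA lookup T lookup.values

-- ===== PORT B =====
-- Termination measure for the stack machine (Source B just loops `while stack:`): W = longest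
-- bucket + 2; a frame at depth d from the top weighs (remaining candidates + 1)·W^d, the whole
-- stack is scaled by W^(number of unvisited types).
def pvW (lookup : PySem.Dict Int (List (Int × Int))) : Nat :=
  (lookup.items.map (fun p => p.2.length)).foldl Nat.max 0 + 2

def pvRem (lookup : PySem.Dict Int (List (Int × Int))) (fr : Int × Int × Nat) : Nat :=
  (pvCands lookup fr.1).length - fr.2.2

def pvPsi (lookup : PySem.Dict Int (List (Int × Int))) : List (Int × Int × Nat) → Nat
  | [] => 0
  | fr :: rest => (pvRem lookup fr + 1) + pvW lookup * pvPsi lookup rest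

def pvMu (lookup : PySem.Dict Int (List (Int × Int))) (stack : List (Int × Int × Nat))
    (v : List Bool) : Nat :=
  pvW lookup ^ v.count false * pvPsi lookup stack

theorem pv_foldl_max_init_le : ∀ (l : List Nat) (a : Nat), a ≤ l.foldl Nat.max a := by
  intro l
  induction l with
  | nil => intro a; simp
  | cons x xs ih => intro a; exact le_trans (Nat.le_max_left a x) (ih (Nat.max a x))

theorem pv_mem_le_foldl_max : ∀ (l : List Nat) (a x : Nat), x ∈ l → x ≤ l.foldl Nat.max a := by
  intro l
  induction l with
  | nil => intro a x h; simp at h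
  | cons y ys ih =>
    intro a x h
    rcases List.mem_cons.mp h with h | h
    · subst h; exact le_trans (Nat.le_max_right a x) (pv_foldl_max_init_le ys _)
    · exact ih _ x h

theorem pv_get?_mem_values : ∀ (its : List (Int × List (Int × Int))) (k : Int)
    (w : List (Int × Int)), (PySem.Dict.mk its).get? k = some w → w ∈ its.map (fun p => p.2) := by
  intro its
  induction its with
  | nil => intro k w h; simp [PySem.Dict.get?] at h
  | cons p rest ih =>
    intro k w h
    obtain ⟨pk, pv⟩ := p
    rw [PySem.Dict.get?_mk_cons] at h
    by_cases hk : (pk == k) = true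
    · simp [hk] at h; subst h; simp
    · simp [hk] at h
      simpa using List.mem_cons_of_mem _ (ih k w h)

theorem pv_bucket_len_lt_pvW (lookup : PySem.Dict Int (List (Int × Int))) (k : Int) :
    (pvCands lookup k).length + 1 < pvW lookup := by
  obtain ⟨its⟩ := lookup
  have hgd : pvCands (PySem.Dict.mk its) k =
      ((PySem.Dict.mk its).get? (PySem.Int.mod k 100)).getD [] := rfl
  unfold pvW
  cases hg : (PySem.Dict.mk its).get? (PySem.Int.mod k 100) with
  | none => rw [hgd, hg]; simp
  | some w =>
    rw [hgd, hg]
    have h1 : w ∈ its.map (fun p => p.2) := pv_get?_mem_values its _ w hg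
    have h2 : w.length ∈ (its.map (fun p => p.2)).map List.length := List.mem_map_of_mem h1
    rw [List.map_map] at h2
    have h3 : w.length ≤ (its.map (fun p => p.2.length)).foldl Nat.max 0 := by
      apply pv_mem_le_foldl_max
      simpa using h2
    simp only [Option.getD_some]
    omega

theorem pv_count_false_set_le : ∀ (v : List Bool) (i : Nat) (b : Bool),
    (v.set i b).count false ≤ v.count false + 1 := by
  intro v
  induction v with
  | nil => intro i b; simp
  | cons a as ih =>
    intro i b
    cases i with
    | zero => cases a <;> cases b <;> simp <;> omega
    | succ j =>
      simp only [List.set_cons_succ, List.count_cons]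
      have := ih j b
      omega

theorem pvWriteV_count_le (v : List Bool) (t : Int) :
    (pvWriteV v t false).count false ≤ v.count false + 1 := by
  cases hr : pvResolve v.length t with
  | none =>
    have e : pvWriteV v t false = v := by unfold pvWriteV; rw [hr]
    rw [e]; omega
  | some i =>
    have e : pvWriteV v t false = v.set i false := by unfold pvWriteV; rw [hr]
    rw [e]; exact pv_count_false_set_le v i false

theorem pvMu_pop (lookup : PySem.Dict Int (List (Int × Int))) (v : List Bool)
    (fr : Int × Int × Nat) (rest : List (Int × Int × Nat)) :
    pvMu lookup rest (pvWriteV v fr.2.1 false) < pvMu lookup (fr :: rest) v := by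
  unfold pvMu
  have hW : 2 ≤ pvW lookup := by unfold pvW; omega
  have hc := pvWriteV_count_le v fr.2.1
  have hpow : pvW lookup ^ (pvWriteV v fr.2.1 false).count false ≤
      pvW lookup ^ (v.count false + 1) :=
    Nat.pow_le_pow_right (by omega) hc
  have hpos : 0 < pvW lookup ^ v.count false := Nat.pow_pos (by omega)
  calc pvW lookup ^ (pvWriteV v fr.2.1 false).count false * pvPsi lookup rest
      ≤ pvW lookup ^ (v.count false + 1) * pvPsi lookup rest :=
        Nat.mul_le_mul_right _ hpow
    _ = pvW lookup ^ v.count false * (pvW lookup * pvPsi lookup rest) := by ring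
    _ < pvW lookup ^ v.count false * pvPsi lookup (fr :: rest) := by
        apply mul_lt_mul_of_pos_left _ hpos
        simp only [pvPsi]
        set M := pvW lookup * pvPsi lookup rest with hM
        omega

theorem pvMu_skip (lookup : PySem.Dict Int (List (Int × Int))) (v : List Bool)
    (node marked : Int) (idx : Nat) (rest : List (Int × Int × Nat))
    (h : idx < (pvCands lookup node).length) :
    pvMu lookup ((node, marked, idx + 1) :: rest) v < pvMu lookup ((node, marked, idx) :: rest) v := by
  unfold pvMu
  have hpos : 0 < pvW lookup ^ v.count false := Nat.pow_pos (by unfold pvW; omega)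
  apply mul_lt_mul_of_pos_left _ hpos
  simp only [pvPsi, pvRem]
  set M := pvW lookup * pvPsi lookup rest with hM
  omega

theorem pvMu_push (lookup : PySem.Dict Int (List (Int × Int))) (v : List Bool)
    (node marked n t : Int) (idx : Nat) (rest : List (Int × Int × Nat))
    (hread : pvReadV v t = false)
    (hidx : idx < (pvCands lookup node).length) :
    pvMu lookup ((n, t, 0) :: (node, marked, idx + 1) :: rest) (pvWriteV v t true) <
      pvMu lookup ((node, marked, idx) :: rest) v := by
  unfold pvMu
  have hW : 2 ≤ pvW lookup := by unfold pvW; omega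
  have hc := pvWriteV_true_count_eq hread
  set W := pvW lookup with hWdef
  set c' := (pvWriteV v t true).count false with hc'
  have hcv : v.count false = c' + 1 := by omega
  have hb := pv_bucket_len_lt_pvW lookup n
  have hpos : 0 < W ^ c' := Nat.pow_pos (by omega)
  rw [hcv, pow_succ]
  have hPsiLt : pvPsi lookup ((n, t, 0) :: (node, marked, idx + 1) :: rest) <
      W * pvPsi lookup ((node, marked, idx) :: rest) := by
    simp only [pvPsi, pvRem]
    set R := pvPsi lookup rest with hR
    set L := (pvCands lookup node).length with hL
    set a := (pvCands lookup n).length with ha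
    have h2 : L - (idx + 1) + 1 = L - idx := by omega
    rw [h2]
    have e : W * ((L - idx + 1) + W * R) = W * ((L - idx) + W * R) + W := by ring
    rw [e]
    set M := W * ((L - idx) + W * R) with hMdef
    have hle : a - 0 + 1 + W * ((L - idx) + W * R) = a + 1 + M := by omega
    omega
  calc W ^ c' * pvPsi lookup ((n, t, 0) :: (node, marked, idx + 1) :: rest)
      < W ^ c' * (W * pvPsi lookup ((node, marked, idx) :: rest)) :=
        mul_lt_mul_of_pos_left hPsiLt hpos
    _ = W ^ c' * W * pvPsi lookup ((node, marked, idx) :: rest) := by ring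

-- Source B's `while stack:` loop; the Lean list holds the stack top-first (Python's stack[-1] is
-- the head here, so the success path reverses the node list where Source B reads it bottom-up)
def pvRunB (lookup : PySem.Dict Int (List (Int × Int))) (start : Int)
    (stack : List (Int × Int × Nat)) (v : List Bool) : Option (List Int) :=
  match stack with
  | [] => none
  | (node, marked, idx) :: rest =>
    if h : (pvCands lookup node).length ≤ idx then
      -- frame exhausted: pop and unmark
      pvRunB lookup start rest (pvWriteV v marked false)
    else
      let p := (pvCands lookup node).getD idx (0, 0)   -- candidates[idx]; in range by ¬h
      let stack' := (node, marked, idx + 1) :: rest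
      if p.1 = start then
        (if v.all (fun b => b) then
          some ((stack'.map (fun f => f.1)).reverse)
        else
          -- closing the cycle too early prunes this whole frame
          pvRunB lookup start rest (pvWriteV v marked false))
      else if pvReadV v p.2 then
        pvRunB lookup start stack' v
      else
        pvRunB lookup start ((p.1, p.2, 0) :: stack') (pvWriteV v p.2 true)
termination_by pvMu lookup stack v
decreasing_by
  · exact pvMu_pop lookup v (node, marked, idx) rest
  · exact pvMu_pop lookup v (node, marked, idx) rest
  · exact pvMu_skip lookup v node marked idx rest (by omega)
  · exact pvMu_push lookup v node marked p.1 p.2 idx rest (by simp_all) (by omega)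

def pvScanB (lookup : PySem.Dict Int (List (Int × Int))) (T : Nat) :
    List (Int × Int) → Option (List Int)
  | [] => none
  | (start, t) :: rest =>
    match pvRunB lookup start [(start, t, 0)] (pvWriteV (List.replicate T false) t true) with
    | some r => some r
    | none => pvScanB lookup T rest

def pvOuterB (lookup : PySem.Dict Int (List (Int × Int))) (T : Nat) :
    List (List (Int × Int)) → Option (List Int)
  | [] => none
  | b :: bs =>
    match pvScanB lookup T b with
    | some r => some r
    | none => pvOuterB lookup T bs

def get_cyclical_figurate_numbers_from_list_alt (figurate_numbers : List (Int × Int)) : Option (List Int) :=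
  let T := pvTypesCnt figurate_numbers
  let lookup := pvBuildLookup figurate_numbers
  pvOuterB lookup T lookup.values

-- ===== PRECONDITION & SPEC =====
-- Pre_ excludes exactly the raising inputs: the empty list (ValueError from max()), any n outside
-- [0, 10000) (KeyError: n // 100 is not a key of lookup) and any figurate_type outside the index
-- range of the visited list (IndexError); on a few inputs of the last kind A still returns,
-- because an earlier start succeeds before the out-of-range type is ever used as an index.
def Pre_get_cyclical_figurate_numbers_from_list (figurate_numbers : List (Int × Int)) : Prop :=
  figurate_numbers ≠ [] ∧ ∀ p ∈ figurate_numbers,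
    0 ≤ p.1 ∧ p.1 < 10000 ∧ PySem.Raise.InRange (pvTypesCnt figurate_numbers) p.2
instance (figurate_numbers : List (Int × Int)) : Decidable (Pre_get_cyclical_figurate_numbers_from_list figurate_numbers) := by unfold Pre_get_cyclical_figurate_numbers_from_list; infer_instance

def pvWitness_get_cyclical_figurate_numbers_from_list : (List (Int × Int)) := [(8128, 0), (2882, 1), (8281, 2)]

def Spec_get_cyclical_figurate_numbers_from_list (figurate_numbers : List (Int × Int)) (out : Option (List Int)) : Prop := out = get_cyclical_figurate_numbers_from_list_alt figurate_numbers
instance (figurate_numbers : List (Int × Int)) (out : Option (List Int)) : Decidable (Spec_get_cyclical_figurate_numbers_from_list figurate_numbers out) := by unfold Spec_get_cyclical_figurate_numbers_from_list; infer_instance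

-- ===== CLAIM (what is proved, stated in full; the proofs are below) =====
def Claim_equal_get_cyclical_figurate_numbers_from_list : Prop := ∀ (figurate_numbers : List (Int × Int)), Dom_get_cyclical_figurate_numbers_from_list figurate_numbers → Pre_get_cyclical_figurate_numbers_from_list figurate_numbers → Spec_get_cyclical_figurate_numbers_from_list figurate_numbers (get_cyclical_figurate_numbers_from_list figurate_numbers)

-- ===== LEMMAS AND PROOFS =====

-- what the machine computes from a given stack, frame by frame, phrased with A's loop
-- (proof-only device; `stop` is the start node of the search)
def pvInterp (lookup : PySem.Dict Int (List (Int × Int))) (stop : Int) :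
    List (Int × Int × Nat) → List Bool → Option (List Int)
  | [], _ => none
  | (node, marked, idx) :: rest, v =>
    match pvLoopA lookup stop node v ((pvCands lookup node).drop idx) with
    | some r => some ((r ++ rest.map (fun f => f.1)).reverse)
    | none => pvInterp lookup stop rest (pvWriteV v marked false)

-- backtracking undoes the mark exactly
theorem pvWriteV_cancel {v : List Bool} {t : Int} (h : pvReadV v t = false) :
    pvWriteV (pvWriteV v t true) t false = v := by
  obtain ⟨i, hr, hi, hv⟩ := pvReadV_false h
  have e1 : pvWriteV v t true = v.set i true := by unfold pvWriteV; rw [hr]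
  have e2 : pvResolve (v.set i true).length t = some i := by rw [List.length_set]; exact hr
  have e3 : pvWriteV (v.set i true) t false = (v.set i true).set i false := by
    unfold pvWriteV; rw [e2]
  rw [e1, e3, List.set_set]
  rw [List.getD_eq_getElem _ _ hi] at hv
  rw [← hv]
  exact List.set_getElem_self hi

theorem pvLoopA_nil (lookup : PySem.Dict Int (List (Int × Int))) (stop current : Int)
    (v : List Bool) : pvLoopA lookup stop current v [] = none := by rw [pvLoopA]

theorem pvLoopA_cons (lookup : PySem.Dict Int (List (Int × Int))) (stop current : Int)
    (v : List Bool) (n t : Int) (rest : List (Int × Int)) :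
    pvLoopA lookup stop current v ((n, t) :: rest) =
      (if n = stop then
        (if v.all (fun b => b) then some [current] else none)
      else if pvReadV v t then
        pvLoopA lookup stop current v rest
      else
        match pvLoopA lookup stop n (pvWriteV v t true) (pvCands lookup n) with
        | some r => some (r ++ [current])
        | none => pvLoopA lookup stop current v rest) := by
  rw [pvLoopA]

-- the key simulation: one machine run equals A's loop on the top frame's remaining
-- candidates, with the deeper frames as the continuation
theorem pvRunB_eq_pvInterp (lookup : PySem.Dict Int (List (Int × Int))) (start : Int) :
    ∀ (stack : List (Int × Int × Nat)) (v : List Bool),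
      pvRunB lookup start stack v = pvInterp lookup start stack v := by
  intro stack v
  fun_induction pvRunB lookup start stack v with
  | case1 v => rfl
  | case2 v node marked idx rest h ih =>
    rw [ih, pvInterp, List.drop_eq_nil_of_le (by omega), pvLoopA_nil]
  | case3 v node marked idx rest h p stack' hstart hall =>
    have hlt : idx < (pvCands lookup node).length := by omega
    have hdrop : (pvCands lookup node).drop idx = p :: (pvCands lookup node).drop (idx + 1) := by
      rw [List.drop_eq_getElem_cons hlt]
      congr 1
      exact (List.getD_eq_getElem _ _ hlt).symm
    rw [pvInterp, hdrop]
    rw [show p = (p.1, p.2) from rfl, pvLoopA_cons]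
    simp [hstart, hall, stack']
  | case4 v node marked idx rest h p hstart hall ih =>
    have hlt : idx < (pvCands lookup node).length := by omega
    have hdrop : (pvCands lookup node).drop idx = p :: (pvCands lookup node).drop (idx + 1) := by
      rw [List.drop_eq_getElem_cons hlt]
      congr 1
      exact (List.getD_eq_getElem _ _ hlt).symm
    rw [ih, pvInterp, hdrop]
    rw [show p = (p.1, p.2) from rfl, pvLoopA_cons]
    simp [hstart, hall]
  | case5 v node marked idx rest h p stack' hstart hread ih =>
    have hlt : idx < (pvCands lookup node).length := by omega
    have hdrop : (pvCands lookup node).drop idx = p :: (pvCands lookup node).drop (idx + 1) := by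
      rw [List.drop_eq_getElem_cons hlt]
      congr 1
      exact (List.getD_eq_getElem _ _ hlt).symm
    rw [ih]
    conv_lhs => rw [pvInterp]
    conv_rhs => rw [pvInterp, hdrop, show p = (p.1, p.2) from rfl, pvLoopA_cons]
    simp [hstart, hread]
  | case6 v node marked idx rest h p stack' hstart hread ih =>
    have hlt : idx < (pvCands lookup node).length := by omega
    have hdrop : (pvCands lookup node).drop idx = p :: (pvCands lookup node).drop (idx + 1) := by
      rw [List.drop_eq_getElem_cons hlt]
      congr 1
      exact (List.getD_eq_getElem _ _ hlt).symm
    have hread' : pvReadV v p.2 = false := by simp_all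
    rw [ih]
    conv_lhs => rw [pvInterp]
    conv_rhs => rw [pvInterp, hdrop, show p = (p.1, p.2) from rfl, pvLoopA_cons]
    rw [pvWriteV_cancel hread']
    simp only [hstart, hread', if_false, Bool.false_eq_true, List.drop_zero]
    cases hX : pvLoopA lookup start p.1 (pvWriteV v p.2 true) (pvCands lookup p.1) with
    | some r =>
      simp only [stack', List.map_cons]
      rw [List.append_cons]
    | none =>
      simp only []
      rw [pvInterp]

-- one start: the machine from a single seeded frame computes A's recursion, reversed
theorem pvRunB_single (lookup : PySem.Dict Int (List (Int × Int))) (start t : Int)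
    (v0 : List Bool) :
    pvRunB lookup start [(start, t, 0)] v0 =
      (pvDfsA lookup start start v0).map List.reverse := by
  rw [pvRunB_eq_pvInterp, pvInterp]
  unfold pvDfsA
  simp only [List.drop_zero]
  cases hX : pvLoopA lookup start start v0 (pvCands lookup start) with
  | some r => simp
  | none => rw [pvInterp]; rfl

theorem pvScanB_eq_pvScanA (lookup : PySem.Dict Int (List (Int × Int))) (T : Nat) :
    ∀ (b : List (Int × Int)), pvScanB lookup T b = pvScanA lookup T b := by
  intro b
  induction b with
  | nil => rfl
  | cons hd rest ih =>
    obtain ⟨start, t⟩ := hd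
    simp only [pvScanA, pvScanB, pvRunB_single]
    cases pvDfsA lookup start start (pvWriteV (List.replicate T false) t true) <;> simp [ih]

theorem pvOuterB_eq_pvOuterA (lookup : PySem.Dict Int (List (Int × Int))) (T : Nat) :
    ∀ (bs : List (List (Int × Int))), pvOuterB lookup T bs = pvOuterA lookup T bs := by
  intro bs
  induction bs with
  | nil => rfl
  | cons b rest ih => simp [pvOuterA, pvOuterB, pvScanB_eq_pvScanA, ih]

-- ===== VERDICT (by name: the statement is the Claim_ definition above) =====
theorem get_cyclical_figurate_numbers_from_list_spec : Claim_equal_get_cyclical_figurate_numbers_from_list := by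
  intro l _ _
  unfold Spec_get_cyclical_figurate_numbers_from_list
  show pvOuterA (pvBuildLookup l) (pvTypesCnt l) (pvBuildLookup l).values =
    get_cyclical_figurate_numbers_from_list_alt l
  rw [← pvOuterB_eq_pvOuterA]
  rfl
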